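-- pv_equiv track=rewrite | github.com/kaynanxd/Estruturas-de-dados | Lista 2 Listas lineares - pilha e fila/q3.py | precosfinais
-- ===== SOURCE A (Python) =====
-- def precosfinais(lista):
--     n = len(lista)
--     resposta = lista[:]
--     pilha=[]
--
--     for i in range(n):
--         while pilha and lista[i]<=lista[pilha[-1]]:
--             j = pilha.pop()
--             resposta[j]= lista[j]-lista[i]
--         pilha.append(i)
--
--     return resposta
-- ===== SOURCE B (Python) =====
-- def precosfinais(lista):
--     n = len(lista)
--     def final(j):
--         for i in range(j + 1, n):
--             if lista[i] <= lista[j]: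
--                 return lista[j] - lista[i]
--         return lista[j]
--     return [final(j) for j in range(n)]
-- ===== Notes on version B (the rewrite author's own statement) =====
-- stated objective: alternative
-- what changed: Replaces the monotonic-stack single pass with a direct per-index forward scan for the first next element <= lista[j].
import Mathlib
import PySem

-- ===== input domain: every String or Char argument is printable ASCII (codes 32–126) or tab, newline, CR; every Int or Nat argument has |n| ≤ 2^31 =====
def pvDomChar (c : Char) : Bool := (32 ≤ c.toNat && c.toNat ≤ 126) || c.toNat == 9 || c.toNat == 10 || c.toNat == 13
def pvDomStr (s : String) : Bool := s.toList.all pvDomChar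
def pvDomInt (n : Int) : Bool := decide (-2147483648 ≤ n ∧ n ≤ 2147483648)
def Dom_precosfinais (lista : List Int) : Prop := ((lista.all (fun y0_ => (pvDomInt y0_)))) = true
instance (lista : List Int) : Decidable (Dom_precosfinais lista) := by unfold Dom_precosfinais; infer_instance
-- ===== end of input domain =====

-- B replaces A's monotonic-stack single pass by a direct per-index forward scan for
-- the first later element ≤ lista[j] (alternative decomposition, not claimed faster).

-- ===== PORT A =====
-- the inner `while pilha and lista[i] <= lista[pilha[-1]]` loop; the stack is a
-- List Nat with head = top (all stack entries come from range(n), hence Nat)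
def pvWhileA (lista : List Int) (i : Nat) : List Int → List Nat → List Int × List Nat
  | resposta, [] => (resposta, [])
  | resposta, j :: rest =>
    if lista.getD i 0 ≤ lista.getD j 0 then
      pvWhileA lista i (resposta.set j (lista.getD j 0 - lista.getD i 0)) rest
    else
      (resposta, j :: rest)

def precosfinais (lista : List Int) : List Int :=
  (List.foldl
    (fun st i =>
      let q := pvWhileA lista i st.1 st.2
      (q.1, i :: q.2))
    (lista, ([] : List Nat)) (List.range lista.length)).1

-- ===== PORT B =====
-- `final(j)` of Source B: scan i in range(j+1, n) for the first lista[i] <= lista[j]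
def pvFinal (lista : List Int) (j : Nat) : Int :=
  match List.find? (fun i => lista.getD i 0 ≤ lista.getD j 0)
      (List.range' (j + 1) (lista.length - (j + 1))) with
  | some i => lista.getD j 0 - lista.getD i 0
  | none => lista.getD j 0

def precosfinais_alt (lista : List Int) : List Int :=
  (List.range lista.length).map (pvFinal lista)

-- ===== PRECONDITION & SPEC =====
def Spec_precosfinais (lista : List Int) (out : List Int) : Prop := out = precosfinais_alt lista
instance (lista : List Int) (out : List Int) : Decidable (Spec_precosfinais lista out) := by unfold Spec_precosfinais; infer_instance

-- ===== CLAIM (what is proved, stated in full; the proofs are below) =====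
def Claim_equal_precosfinais : Prop := ∀ (lista : List Int), Dom_precosfinais lista → Spec_precosfinais lista (precosfinais lista)

-- ===== LEMMAS AND PROOFS =====

-- first index k with j < k < m and L[k] ≤ L[j] (as B scans for, with upper bound m)
def pvNse (L : List Int) (m j : Nat) : Option Nat :=
  List.find? (fun k => L.getD k 0 ≤ L.getD j 0) (List.range' (j + 1) (m - (j + 1)))

def pvR (L : List Int) : Nat → Nat → Prop := fun a b => b < a ∧ L.getD b 0 < L.getD a 0

-- loop invariant after the first i iterations of A's for loop
def pvInv (L : List Int) (i : Nat) (r : List Int) (p : List Nat) : Prop :=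
  r.length = L.length ∧
  (∀ j ∈ p, j < i) ∧
  List.Pairwise (pvR L) p ∧
  (∀ j, j < i → (j ∈ p ↔ pvNse L i j = none)) ∧
  (∀ j, j < L.length →
    r.getD j 0 = match pvNse L i j with
      | some k => L.getD j 0 - L.getD k 0
      | none => L.getD j 0)

theorem pvNse_none_of_le (L : List Int) {m j : Nat} (h : m ≤ j + 1) : pvNse L m j = none := by
  unfold pvNse
  have : m - (j + 1) = 0 := Nat.sub_eq_zero_of_le h
  simp [this]

theorem pvNse_succ (L : List Int) {i j : Nat} (h : j < i) :
    pvNse L (i + 1) j =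
      (pvNse L i j).or (if L.getD i 0 ≤ L.getD j 0 then some i else none) := by
  unfold pvNse
  have h1 : i + 1 - (j + 1) = (i - (j + 1)) + 1 := by omega
  have h2 : j + 1 + (i - (j + 1)) = i := by omega
  rw [h1, List.range'_concat, List.find?_append]
  simp [h2, List.find?]
  split_ifs with hle <;> simp [hle]

-- all elements of the dropped part of the stack have value < L[i]
theorem pvDrop_lt (L : List Int) (i : Nat) :
    ∀ (p : List Nat), List.Pairwise (pvR L) p →
    ∀ x ∈ p.dropWhile (fun j => decide (L.getD i 0 ≤ L.getD j 0)), L.getD x 0 < L.getD i 0 := by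
  intro p
  induction p with
  | nil => intro _ x hx; simp at hx
  | cons j rest ih =>
    intro hp x hx
    rw [List.pairwise_cons] at hp
    rw [List.dropWhile_cons] at hx
    by_cases hle : L.getD i 0 ≤ L.getD j 0
    · rw [if_pos (decide_eq_true hle)] at hx
      exact ih hp.2 x hx
    · rw [if_neg (by simpa using hle)] at hx
      rcases List.mem_cons.mp hx with rfl | hx
      · omega
      · have := (hp.1 x hx).2
        omega

theorem pvMem_dropWhile (L : List Int) (i : Nat) (p : List Nat)
    (hp : List.Pairwise (pvR L) p) (j : Nat) :
    j ∈ p.dropWhile (fun j => decide (L.getD i 0 ≤ L.getD j 0)) ↔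
      j ∈ p ∧ ¬ L.getD i 0 ≤ L.getD j 0 := by
  constructor
  · intro h
    refine ⟨(List.dropWhile_sublist _).subset h, ?_⟩
    have := pvDrop_lt L i p hp j h
    omega
  · rintro ⟨hmem, hlt⟩
    have hsplit := List.takeWhile_append_dropWhile
      (p := fun j => decide (L.getD i 0 ≤ L.getD j 0)) (l := p)
    rw [← hsplit] at hmem
    rcases List.mem_append.mp hmem with h | h
    · have := List.mem_takeWhile_imp h
      rw [decide_eq_true_eq] at this; omega
    · exact h

-- what one run of the inner while loop does
theorem pvWhileA_spec (L : List Int) (i : Nat) :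
    ∀ (p : List Nat) (r : List Int),
    r.length = L.length → (∀ j ∈ p, j < L.length) → List.Pairwise (pvR L) p →
    (pvWhileA L i r p).2 = p.dropWhile (fun j => decide (L.getD i 0 ≤ L.getD j 0)) ∧
    (pvWhileA L i r p).1.length = L.length ∧
    (∀ j, j < L.length →
      (pvWhileA L i r p).1.getD j 0 =
        if j ∈ p ∧ L.getD i 0 ≤ L.getD j 0 then L.getD j 0 - L.getD i 0 else r.getD j 0) := by
  intro p
  induction p with
  | nil =>
    intro r hr _ _
    refine ⟨rfl, hr, ?_⟩
    intro j _; simp [pvWhileA]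
  | cons j rest ih =>
    intro r hr hlen hp
    rw [List.pairwise_cons] at hp
    have hjrest : j ∉ rest := fun h => absurd ((hp.1 j h).1) (lt_irrefl j)
    by_cases hle : L.getD i 0 ≤ L.getD j 0
    · have hstep : pvWhileA L i r (j :: rest) =
        pvWhileA L i (r.set j (L.getD j 0 - L.getD i 0)) rest := by
        rw [pvWhileA, if_pos hle]
      have hr' : (r.set j (L.getD j 0 - L.getD i 0)).length = L.length := by
        simp [hr]
      obtain ⟨h1, h2, h3⟩ := ih (r.set j (L.getD j 0 - L.getD i 0)) hr'
        (fun x hx => hlen x (List.mem_cons_of_mem _ hx)) hp.2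
      refine ⟨?_, ?_, ?_⟩
      · rw [hstep, h1, List.dropWhile_cons, if_pos (decide_eq_true hle)]
      · rw [hstep]; exact h2
      · intro j' hj'
        rw [hstep, h3 j' hj']
        by_cases hjj : j' = j
        · subst hjj
          rw [if_neg (fun h => hjrest h.1), if_pos ⟨List.mem_cons_self, hle⟩]
          rw [List.getD_eq_getElem?_getD, List.getElem?_set_self (by omega)]
          rfl
        · by_cases hm : j' ∈ rest ∧ L.getD i 0 ≤ L.getD j' 0
          · rw [if_pos hm, if_pos ⟨List.mem_cons_of_mem _ hm.1, hm.2⟩]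
          · have : ¬ (j' ∈ j :: rest ∧ L.getD i 0 ≤ L.getD j' 0) := by
              intro ⟨ha, hb⟩
              rcases List.mem_cons.mp ha with h | h
              · exact hjj h
              · exact hm ⟨h, hb⟩
            simp only [hm, this, if_false]
            rw [List.getD_eq_getElem?_getD, List.getD_eq_getElem?_getD,
              List.getElem?_set_ne (by omega)]
            rfl
    · have hstep : pvWhileA L i r (j :: rest) = (r, j :: rest) := by
        rw [pvWhileA, if_neg hle]
      refine ⟨?_, ?_, ?_⟩
      · rw [hstep, List.dropWhile_cons, if_neg (by simpa using hle)]
      · rw [hstep]; exact hr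
      · intro j' hj'
        rw [hstep]
        have : ¬ (j' ∈ j :: rest ∧ L.getD i 0 ≤ L.getD j' 0) := by
          intro ⟨ha, hb⟩
          rcases List.mem_cons.mp ha with rfl | h
          · exact hle hb
          · have := (hp.1 j' h).2; omega
        simp only [this, if_false]

-- the invariant is preserved by one iteration of the for loop
theorem pvInv_step (L : List Int) (i : Nat) (r : List Int) (p : List Nat)
    (hi : i < L.length) (hinv : pvInv L i r p) :
    pvInv L (i + 1) (pvWhileA L i r p).1 (i :: (pvWhileA L i r p).2) := by
  obtain ⟨hr, hlt, hp, hmem, hval⟩ := hinv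
  have hlen : ∀ j ∈ p, j < L.length := fun j hj => lt_trans (hlt j hj) hi
  obtain ⟨h1, h2, h3⟩ := pvWhileA_spec L i p r hr hlen hp
  have hdropmem : ∀ j, j ∈ (pvWhileA L i r p).2 ↔ j ∈ p ∧ ¬ L.getD i 0 ≤ L.getD j 0 := by
    intro j; rw [h1]; exact pvMem_dropWhile L i p hp j
  refine ⟨h2, ?_, ?_, ?_, ?_⟩
  · intro j hj
    rcases List.mem_cons.mp hj with rfl | hj
    · omega
    · have := hlt j ((hdropmem j).mp hj).1; omega
  · rw [List.pairwise_cons]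
    refine ⟨?_, ?_⟩
    · intro x hx
      obtain ⟨hxp, hxlt⟩ := (hdropmem x).mp hx
      exact ⟨hlt x hxp, by omega⟩
    · rw [h1]; exact hp.sublist (List.dropWhile_sublist _)
  · intro j hj
    by_cases hji : j = i
    · subst hji
      simp [pvNse_none_of_le L (le_refl (j + 1))]
    · have hjlt : j < i := by omega
      rw [List.mem_cons]
      rw [pvNse_succ L hjlt]
      constructor
      · rintro (rfl | hmem')
        · exact absurd rfl hji
        · obtain ⟨hjp, hjv⟩ := (hdropmem j).mp hmem'
          have := (hmem j hjlt).mp hjp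
          rw [this, if_neg hjv]
          rfl
      · intro hnone
        rcases Option.or_eq_none_iff.mp hnone with ⟨ha, hb⟩
        right
        rw [hdropmem j]
        refine ⟨(hmem j hjlt).mpr ha, ?_⟩
        intro hle; rw [if_pos hle] at hb; exact Option.some_ne_none i hb
  · intro j hj
    rw [h3 j hj]
    by_cases hji : i ≤ j
    · have hnse_i : pvNse L i j = none := pvNse_none_of_le L (by omega)
      have hnse_i1 : pvNse L (i + 1) j = none := by
        by_cases hij : j = i
        · subst hij; exact pvNse_none_of_le L (le_refl _)
        · exact pvNse_none_of_le L (by omega)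
      have hjnp : j ∉ p := fun h => absurd (hlt j h) (by omega)
      simp only [hjnp, false_and, if_false]
      rw [hval j hj, hnse_i, hnse_i1]
    · have hjlt : j < i := by omega
      rw [pvNse_succ L hjlt]
      rcases hcase : pvNse L i j with _ | k
      · have hjp : j ∈ p := (hmem j hjlt).mpr hcase
        by_cases hle : L.getD i 0 ≤ L.getD j 0
        · rw [if_pos ⟨hjp, hle⟩, if_pos hle]
          rfl
        · rw [if_neg (fun h => hle h.2), hval j hj, hcase, if_neg hle]
          rfl
      · have hjnp : j ∉ p := by
          intro h
          rw [hmem j hjlt] at h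
          rw [h] at hcase; cases hcase
        rw [if_neg (fun h => hjnp h.1), hval j hj, hcase]
        rfl

theorem pvInv_fold (L : List Int) (m : Nat) (hm : m ≤ L.length) :
    pvInv L m
      ((List.foldl (fun st i => let q := pvWhileA L i st.1 st.2; (q.1, i :: q.2))
        (L, ([] : List Nat)) (List.range m)).1)
      ((List.foldl (fun st i => let q := pvWhileA L i st.1 st.2; (q.1, i :: q.2))
        (L, ([] : List Nat)) (List.range m)).2) := by
  induction m with
  | zero =>
    refine ⟨rfl, by simp, by simp, by omega, ?_⟩
    intro j hj
    rw [pvNse_none_of_le L (by omega), List.range_zero]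
    rfl
  | succ m ih =>
    have hm' : m ≤ L.length := by omega
    have := pvInv_step L m _ _ (by omega) (ih hm')
    rw [List.range_succ, List.foldl_append]
    simpa using this

theorem pvMain (L : List Int) : precosfinais L = precosfinais_alt L := by
  obtain ⟨hr, _, _, _, hval⟩ := pvInv_fold L L.length (le_refl _)
  unfold precosfinais precosfinais_alt
  apply List.ext_getElem
  · simpa using hr
  · intro j hj1 hj2
    have hjL : j < L.length := by simpa using hj2
    have h1 : ((List.foldl (fun st i => let q := pvWhileA L i st.1 st.2; (q.1, i :: q.2))
        (L, ([] : List Nat)) (List.range L.length)).1)[j] =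
        ((List.foldl (fun st i => let q := pvWhileA L i st.1 st.2; (q.1, i :: q.2))
        (L, ([] : List Nat)) (List.range L.length)).1).getD j 0 := by
      rw [List.getD_eq_getElem _ _ (by omega)]
    rw [h1, hval j hjL]
    rw [List.getElem_map, List.getElem_range]
    unfold pvFinal pvNse
    rfl

-- ===== VERDICT (by name: the statement is the Claim_ definition above) =====
theorem precosfinais_spec : Claim_equal_precosfinais := by
  intro lista _
  unfold Spec_precosfinais
  exact pvMain lista
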